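-- pv_equiv track=rewrite | github.com/borisshapa/TunePPO | ppotune/reward.py | liststrip
-- ===== SOURCE A (Python) =====
-- from typing import Any
--
-- def liststrip(lst: list, element: Any) -> list:
--     start = 0
--     while start < len(lst) and lst[start] == element:
--         start += 1
--
--     end = len(lst)
--     while end > start and lst[end - 1] == element:
--         end -= 1
--
--     return lst[start:end]
-- ===== SOURCE B (Python) =====
-- from typing import Any
--
-- def liststrip(lst: list, element: Any) -> list:
--     out = []
--     pending = 0
--     for e in lst:
--         if e == element:
--             if out:
--                 pending += 1
--         else:
--             out.extend([element] * pending)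
--             pending = 0
--             out.append(e)
--     return out
-- ===== Notes on version B (the rewrite author's own statement) =====
-- stated objective: alternative
-- what changed: Replaced the two end-scanning index loops plus slice by a single forward pass with an accumulator that buffers runs of the stripped element: leading matches are skipped, interior runs are flushed when a non-matching element arrives, and the trailing run is simply never flushed.
import Mathlib
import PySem

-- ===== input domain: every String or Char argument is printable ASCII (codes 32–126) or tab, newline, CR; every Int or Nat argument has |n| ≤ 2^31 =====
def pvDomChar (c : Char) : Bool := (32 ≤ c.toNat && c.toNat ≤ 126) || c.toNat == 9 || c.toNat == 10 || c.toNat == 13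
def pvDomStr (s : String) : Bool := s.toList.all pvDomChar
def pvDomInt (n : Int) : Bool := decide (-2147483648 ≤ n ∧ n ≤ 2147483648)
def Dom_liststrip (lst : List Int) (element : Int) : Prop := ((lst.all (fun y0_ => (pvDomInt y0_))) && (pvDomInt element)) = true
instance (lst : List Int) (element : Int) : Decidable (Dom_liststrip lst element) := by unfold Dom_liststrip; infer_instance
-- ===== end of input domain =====

-- B replaces A's two end-scanning index loops + slice by one forward pass with an
-- accumulator that buffers runs of the stripped element; objective: alternative, same O(n).

-- ===== PORT A =====
-- first while loop: advance `start` past leading elements equal to `element`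
def liststripStart (lst : List Int) (element : Int) (start : Nat) : Nat :=
  if h : start < lst.length ∧ lst[start]! == element then
    liststripStart lst element (start + 1)
  else
    start
termination_by lst.length - start
decreasing_by omega

-- second while loop: move `en` down past trailing elements equal to `element`
def liststripEnd (lst : List Int) (element : Int) (start : Nat) (en : Nat) : Nat :=
  if h : en > start ∧ lst[en - 1]! == element then
    liststripEnd lst element start (en - 1)
  else
    en
termination_by en
decreasing_by omega

def liststrip (lst : List Int) (element : Int) : List Int :=
  let start := liststripStart lst element 0
  let en := liststripEnd lst element start lst.length
  PySem.List.slice lst (some (start : Int)) (some (en : Int))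

-- ===== PORT B =====
-- loop body of Source B's single for-loop: state = (out, pending)
def liststripStep (element : Int) (st : List Int × Nat) (e : Int) : List Int × Nat :=
  if e == element then
    if !st.1.isEmpty then (st.1, st.2 + 1) else st
  else
    ((st.1 ++ List.replicate st.2 element) ++ [e], 0)

def liststrip_alt (lst : List Int) (element : Int) : List Int :=
  (lst.foldl (liststripStep element) ([], 0)).1

-- ===== PRECONDITION & SPEC =====
def Spec_liststrip (lst : List Int) (element : Int) (out : List Int) : Prop := out = liststrip_alt lst element
instance (lst : List Int) (element : Int) (out : List Int) : Decidable (Spec_liststrip lst element out) := by unfold Spec_liststrip; infer_instance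

-- ===== CLAIM (what is proved, stated in full; the proofs are below) =====
def Claim_equal_liststrip : Prop := ∀ (lst : List Int) (element : Int), Dom_liststrip lst element → Spec_liststrip lst element (liststrip lst element)

-- ===== LEMMAS AND PROOFS =====

theorem liststripStart_spec (lst : List Int) (element : Int) (s : Nat) (hs : s ≤ lst.length) :
    liststripStart lst element s ≤ lst.length ∧
      List.drop (liststripStart lst element s) lst
        = (List.drop s lst).dropWhile (fun e => e == element) := by
  fun_induction liststripStart lst element s with
  | case1 s h ih =>
    obtain ⟨hlt, heq⟩ := h
    have h1 := ih (by omega)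
    refine ⟨h1.1, ?_⟩
    rw [h1.2, List.drop_eq_getElem_cons hlt, List.dropWhile_cons]
    rw [getElem!_pos lst s hlt] at heq
    simp [heq]
  | case2 s h =>
    push Not at h
    refine ⟨hs, ?_⟩
    by_cases hlen : s < lst.length
    · have hne := h hlen
      rw [getElem!_pos lst s hlen] at hne
      rw [List.drop_eq_getElem_cons hlen, List.dropWhile_cons]
      simp [hne]
    · have : lst.length ≤ s := by omega
      rw [List.drop_eq_nil_of_le (by omega)]
      simp

theorem liststripEnd_spec (lst : List Int) (element : Int) (s : Nat) (en : Nat)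
    (hse : s ≤ en) (hen : en ≤ lst.length) :
    s ≤ liststripEnd lst element s en ∧ liststripEnd lst element s en ≤ en ∧
      List.drop s (List.take (liststripEnd lst element s en) lst)
        = List.rdropWhile (fun e => e == element) (List.drop s (List.take en lst)) := by
  fun_induction liststripEnd lst element s en with
  | case1 en h ih =>
    obtain ⟨hgt, heq⟩ := h
    have hlt : en - 1 < lst.length := by omega
    have h1 := ih (by omega) (by omega)
    refine ⟨h1.1, by omega, ?_⟩
    have hdec : List.drop s (List.take en lst)
        = List.drop s (List.take (en - 1) lst) ++ [lst[en - 1]] := by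
      conv_lhs => rw [show en = (en - 1) + 1 by omega]
      rw [List.take_add_one, List.getElem?_eq_getElem hlt,
        List.drop_append_of_le_length (by simp; omega)]
      simp
    rw [getElem!_pos lst (en - 1) hlt] at heq
    rw [hdec, List.rdropWhile_concat_pos (fun e => e == element) _ lst[en - 1] heq]
    exact h1.2.2
  | case2 en h =>
    push Not at h
    refine ⟨hse, le_rfl, ?_⟩
    by_cases hgt : s < en
    · have hlt : en - 1 < lst.length := by omega
      have hne := h hgt
      rw [getElem!_pos lst (en - 1) hlt] at hne
      have hdec : List.drop s (List.take en lst)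
          = List.drop s (List.take (en - 1) lst) ++ [lst[en - 1]] := by
        conv_lhs => rw [show en = (en - 1) + 1 by omega]
        rw [List.take_add_one, List.getElem?_eq_getElem hlt,
          List.drop_append_of_le_length (by simp; omega)]
        simp
      rw [hdec, List.rdropWhile_concat_neg (fun e => e == element) _ lst[en - 1] (by simpa using hne)]
    · have hes : en = s := by omega
      subst hes
      rw [List.drop_eq_nil_of_le (by simp), List.rdropWhile_nil]

-- A's value is rdropWhile after dropWhile
theorem liststrip_eq_rdrop_drop (lst : List Int) (element : Int) :
    liststrip lst element
      = List.rdropWhile (fun e => e == element)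
          ((lst.dropWhile (fun e => e == element))) := by
  unfold liststrip
  obtain ⟨h1, h2⟩ := liststripStart_spec lst element 0 (Nat.zero_le _)
  obtain ⟨e1, e2, e3⟩ :=
    liststripEnd_spec lst element (liststripStart lst element 0) lst.length h1 le_rfl
  rw [PySem.List.slice_natCast, ← List.drop_take, e3, List.take_length]
  rw [List.drop_zero] at h2
  rw [h2]

-- rdropWhile absorbs an appended run of the dropped element
theorem rdropWhile_append_replicate (element : Int) (l : List Int) (p : Nat) :
    List.rdropWhile (fun e => e == element) (l ++ List.replicate p element)
      = List.rdropWhile (fun e => e == element) l := by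
  induction p with
  | zero => simp
  | succ p ih =>
    rw [List.replicate_succ', ← List.append_assoc,
      List.rdropWhile_concat_pos (fun e => e == element) _ element (by simp)]
    exact ih

-- main-phase invariant of B's fold: once out is nonempty and rdropWhile-fixed,
-- the fold's result is rdropWhile of the whole virtual list
theorem liststripFold_spec (element : Int) (rest : List Int) :
    ∀ (out : List Int) (p : Nat), out ≠ [] →
      List.rdropWhile (fun e => e == element) out = out →
      (rest.foldl (liststripStep element) (out, p)).1
        = List.rdropWhile (fun e => e == element) (out ++ List.replicate p element ++ rest) := by
  induction rest with
  | nil =>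
    intro out p hne hfix
    simp only [List.foldl_nil, List.append_nil]
    rw [rdropWhile_append_replicate, hfix]
  | cons a rest ih =>
    intro out p hne hfix
    simp only [List.foldl_cons, liststripStep]
    by_cases ha : a = element
    · subst ha
      simp only [beq_self_eq_true, if_true, List.isEmpty_eq_false_iff.mpr hne,
        Bool.not_false, if_true]
      rw [ih out (p + 1) hne hfix]
      congr 1
      rw [List.replicate_succ', List.append_assoc, List.append_assoc]
      simp
    · have hb : (a == element) = false := by simp [ha]
      simp only [hb, Bool.false_eq_true, if_false]
      rw [ih ((out ++ List.replicate p element) ++ [a]) 0 (by simp) ?_]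
      · congr 1
        simp
      · rw [List.rdropWhile_concat_neg (fun e => e == element) _ a (by simp [ha])]

-- skip phase: from the empty state, B's fold ignores leading elements
theorem liststripFold_drop (element : Int) (lst : List Int) :
    lst.foldl (liststripStep element) ([], 0)
      = (lst.dropWhile (fun e => e == element)).foldl (liststripStep element) ([], 0) := by
  induction lst with
  | nil => rfl
  | cons a rest ih =>
    by_cases ha : a = element
    · have : liststripStep element ([], 0) element = ([], 0) := by
        simp [liststripStep]
      simp only [List.foldl_cons, List.dropWhile_cons, ha, beq_self_eq_true, if_true]
      rw [this, ih]
    · simp [ha]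

-- ===== VERDICT (by name: the statement is the Claim_ definition above) =====
theorem liststrip_spec : Claim_equal_liststrip := by
  intro lst element _
  unfold Spec_liststrip liststrip_alt
  rw [liststrip_eq_rdrop_drop, liststripFold_drop]
  cases hd : lst.dropWhile (fun e => e == element) with
  | nil => simp
  | cons a t =>
    have ha : (a == element) = false := by
      have := List.head?_dropWhile_not (fun e => e == element) lst
      rw [hd] at this
      simpa using this
    simp only [List.foldl_cons, liststripStep, ha, Bool.false_eq_true, if_false,
      List.isEmpty_nil, List.replicate_zero, List.append_nil, List.nil_append]
    rw [liststripFold_spec element t [a] 0 (by simp)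
      (by rw [List.rdropWhile_singleton]; simp [ha])]
    simp
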